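-- pv_equiv track=rewrite | github.com/mattjhussey/pemjh | src/pemjh/challenge134/main.py | f
-- ===== SOURCE A (Python) =====
-- def jumpSize(t, c, s):
--     if t == c:
--         return 0
--
--     # s will always be 1, 3, 7, or 9
--     if s == 1:
--         cycle = [1, 2, 3, 4, 5, 6, 7, 8, 9, 0]
--     elif s == 3:
--         cycle = [3, 6, 9, 2, 5, 8, 1, 4, 7, 0]
--     elif s == 7:
--         cycle = [7, 4, 1, 8, 5, 2, 9, 6, 3, 0]
--     else:
--         cycle = [9, 8, 7, 6, 5, 4, 3, 2, 1, 0]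
--
--     # Find c in cycle
--     cInd = cycle.index(c)
--
--     # Find t in cycle
--     tInd = cycle.index(t)
--
--     # Is t after c?
--     if t in cycle[cInd:]:
--         return tInd - cInd
--
--     return 10 - cInd + tInd
--
-- def f(target, current, step):
--     # Get the last digit of step
--     s = step % 10
--     # Get the last digit of current
--     c = current % 10
--     # Get the last digit of target
--     t = target % 10
--
--     # Get the amount to jump step by to get to the target digit
--     jump = jumpSize(t, c, s) * step
--     current += jump
--
--     # If target >= 10, recur
--     if target >= 10:
--         return f(target // 10, current // 10, step) * 10 + t
--
--     return current
-- ===== SOURCE B (Python) =====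
-- def jumpSize(t, c, s):
--     if t == c:
--         return 0
--
--     # s will always be 1, 3, 7, or 9
--     if s == 1:
--         cycle = [1, 2, 3, 4, 5, 6, 7, 8, 9, 0]
--     elif s == 3:
--         cycle = [3, 6, 9, 2, 5, 8, 1, 4, 7, 0]
--     elif s == 7:
--         cycle = [7, 4, 1, 8, 5, 2, 9, 6, 3, 0]
--     else:
--         cycle = [9, 8, 7, 6, 5, 4, 3, 2, 1, 0]
--
--     # Find c in cycle
--     cInd = cycle.index(c)
--
--     # Find t in cycle
--     tInd = cycle.index(t)
--
--     # Is t after c?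
--     if t in cycle[cInd:]:
--         return tInd - cInd
--
--     return 10 - cInd + tInd
--
--
-- def f(target, current, step):
--     # Iterative version: walk down target's digits, adjusting current,
--     # collecting the processed digits, then reassemble the result.
--     digits = []
--     T, C = target, current
--     while True:
--         t = T % 10
--         C += jumpSize(t, C % 10, step % 10) * step
--         if T >= 10:
--             digits.append(t)
--             T //= 10
--             C //= 10
--         else:
--             break
--     result = C
--     for t in reversed(digits):
--         result = result * 10 + t
--     return result
-- ===== Notes on version B (the rewrite author's own statement) =====
-- stated objective: alternative
-- what changed: Replaced A's recursion over target's digits (building the result on the way out of the call stack) with an iterative single loop that collects the processed digits in a list and reassembles the result by a reverse fold afterwards.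
import Mathlib
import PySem

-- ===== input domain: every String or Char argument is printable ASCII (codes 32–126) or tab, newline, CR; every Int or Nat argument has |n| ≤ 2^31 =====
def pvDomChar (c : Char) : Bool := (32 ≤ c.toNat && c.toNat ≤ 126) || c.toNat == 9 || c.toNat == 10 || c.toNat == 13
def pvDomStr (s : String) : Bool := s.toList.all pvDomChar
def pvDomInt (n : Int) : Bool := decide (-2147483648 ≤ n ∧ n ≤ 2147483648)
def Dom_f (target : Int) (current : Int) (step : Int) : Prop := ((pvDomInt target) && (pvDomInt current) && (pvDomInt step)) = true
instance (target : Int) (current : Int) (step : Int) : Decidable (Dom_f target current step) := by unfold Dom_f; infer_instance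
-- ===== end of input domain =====

-- B replaces A's recursion over target's digits with a single loop collecting the digits
-- plus a reverse fold reassembling the result (objective: alternative decomposition).

-- ===== PORT A =====
-- shared helper, identical in Source A and Source B
-- cycle always contains every digit 0-9 and jumpSize is only called with t, c in 0..9,
-- so Python's list.index never raises; '.getD 0' is on an unreachable branch.
def jumpSize (t : Int) (c : Int) (s : Int) : Int :=
  if t = c then 0
  else
    let cycle : List Int :=
      if s = 1 then [1, 2, 3, 4, 5, 6, 7, 8, 9, 0]
      else if s = 3 then [3, 6, 9, 2, 5, 8, 1, 4, 7, 0]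
      else if s = 7 then [7, 4, 1, 8, 5, 2, 9, 6, 3, 0]
      else [9, 8, 7, 6, 5, 4, 3, 2, 1, 0]
    let cInd : Nat := (PySem.List.index? cycle c).getD 0
    let tInd : Nat := (PySem.List.index? cycle t).getD 0
    if t ∈ PySem.List.slice cycle (some (cInd : Int)) none then
      (tInd : Int) - (cInd : Int)
    else
      10 - (cInd : Int) + (tInd : Int)

def f (target : Int) (current : Int) (step : Int) : Int :=
  let s := PySem.Int.mod step 10
  let c := PySem.Int.mod current 10
  let t := PySem.Int.mod target 10
  let jump := jumpSize t c s * step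
  let current' := current + jump
  if target ≥ 10 then
    f (PySem.Int.floordiv target 10) (PySem.Int.floordiv current' 10) step * 10 + t
  else
    current'
termination_by target.toNat
decreasing_by
  rw [PySem.Int.floordiv_eq_ediv_of_pos (by omega : (0:Int) < 10)]
  omega

-- ===== PORT B =====
def fLoop (T : Int) (C : Int) (step : Int) (digits : List Int) : Int × List Int :=
  let t := PySem.Int.mod T 10
  let C' := C + jumpSize t (PySem.Int.mod C 10) (PySem.Int.mod step 10) * step
  if T ≥ 10 then
    fLoop (PySem.Int.floordiv T 10) (PySem.Int.floordiv C' 10) step (digits ++ [t])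
  else
    (C', digits)
termination_by T.toNat
decreasing_by
  rw [PySem.Int.floordiv_eq_ediv_of_pos (by omega : (0:Int) < 10)]
  omega

def f_alt (target : Int) (current : Int) (step : Int) : Int :=
  let p := fLoop target current step []
  p.2.reverse.foldl (fun result t => result * 10 + t) p.1

-- ===== PRECONDITION & SPEC =====
def Spec_f (target : Int) (current : Int) (step : Int) (out : Int) : Prop := out = f_alt target current step
instance (target : Int) (current : Int) (step : Int) (out : Int) : Decidable (Spec_f target current step out) := by unfold Spec_f; infer_instance

-- ===== CLAIM (what is proved, stated in full; the proofs are below) =====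
def Claim_equal_f : Prop := ∀ (target : Int) (current : Int) (step : Int), Dom_f target current step → Spec_f target current step (f target current step)

-- ===== LEMMAS AND PROOFS =====
theorem fLoop_fold_eq (T : Int) (C : Int) (step : Int) (digits : List Int) :
    (fLoop T C step digits).2.reverse.foldl (fun result t => result * 10 + t) (fLoop T C step digits).1
      = digits.reverse.foldl (fun result t => result * 10 + t) (f T C step) := by
  rw [fLoop, f]
  by_cases h : T ≥ 10
  · simp only [h, if_pos]
    rw [fLoop_fold_eq]
    simp
  · simp [h]
termination_by T.toNat
decreasing_by
  rw [PySem.Int.floordiv_eq_ediv_of_pos (by omega : (0:Int) < 10)]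
  omega

-- ===== VERDICT (by name: the statement is the Claim_ definition above) =====
theorem f_spec : Claim_equal_f := by
  intro target current step _
  unfold Spec_f f_alt
  have h := fLoop_fold_eq target current step []
  simpa using h.symm
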